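-- pv_equiv track=rewrite | github.com/20kdc/c3ds-projects | caosproxy/tools/libs16.py | dither_point_last_list
-- ===== SOURCE A (Python) =====
-- def dither_point_first_list(points: list):
-- 	"""
-- 	Given a list of 0-255 ints, creates a list giving the index to the first
-- 	instance of a given number.
-- 	"""
-- 	lst = []
-- 	last_value = -1
-- 	last_index = -1
-- 	idx = 0
-- 	for v in points:
-- 		if v != last_value:
-- 			lst.append(idx)
-- 			last_value = v
-- 			last_index = idx
-- 		else:
-- 			lst.append(last_index)
-- 		idx += 1
-- 	return lst
--
-- def dither_point_last_list(points: list):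
-- 	"""
-- 	Given a list of 0-255 ints, creates a list giving the index to the last
-- 	instance of a given number.
-- 	"""
-- 	# reverse inputs
-- 	tmprev = list(points)
-- 	tmprev.reverse()
-- 	# do it
-- 	lst = dither_point_first_list(tmprev)
-- 	# reverse results
-- 	lst.reverse()
-- 	for i in range(len(lst)):
-- 		lst[i] = len(points) - (lst[i] + 1)
-- 	return lst
-- ===== SOURCE B (Python) =====
-- def dither_point_last_list(points: list):
-- 	"""
-- 	Given a list of 0-255 ints, creates a list giving the index to the last
-- 	instance of a given number, by a single forward run-boundary scan.
-- 	"""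
-- 	out = []
-- 	idx = 0
-- 	rest = points
-- 	while rest:
-- 		k = 1
-- 		while k < len(rest) and rest[k] == rest[0]:
-- 			k += 1
-- 		out.extend([idx + k - 1] * k)
-- 		idx += k
-- 		rest = rest[k:]
-- 	return out
-- ===== Notes on version B (the rewrite author's own statement) =====
-- stated objective: simpler
-- what changed: Replaces A's copy/reverse -> first-instance scan -> reverse -> arithmetic-remap pipeline with a single forward scan over maximal runs of consecutive equal values that emits the run's last index once per element, without copying or reversing the list.
-- intended difference: On lists whose last element is -1, A's last_value=-1 sentinel makes it return the out-of-range index len(points) for every position of the trailing run of -1s, while B returns the correct last index len(points)-1, which is the intended value since a valid index never equals the length. — e.g. on dither_point_last_list([-1]): A returns [1], B returns [0]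
import Mathlib
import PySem

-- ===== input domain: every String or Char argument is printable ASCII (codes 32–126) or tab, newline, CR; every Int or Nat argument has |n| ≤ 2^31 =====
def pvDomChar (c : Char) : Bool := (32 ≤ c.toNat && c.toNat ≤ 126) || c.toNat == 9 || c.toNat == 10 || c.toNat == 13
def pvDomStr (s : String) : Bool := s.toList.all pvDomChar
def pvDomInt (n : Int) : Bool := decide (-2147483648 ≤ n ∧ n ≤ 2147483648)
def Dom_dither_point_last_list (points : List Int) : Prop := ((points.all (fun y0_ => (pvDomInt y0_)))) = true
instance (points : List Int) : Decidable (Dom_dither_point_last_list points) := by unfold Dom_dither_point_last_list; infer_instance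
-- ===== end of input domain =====

-- B replaces A's reverse / first-list / reverse / arithmetic-remap detour with one
-- forward run-boundary scan (objective: simpler); B also fixes A's -1-sentinel bug on
-- lists whose last element is -1 (see D_ below).

-- ===== PORT A =====
-- state: (lst, last_value, last_index, idx)
def pvDpflStep (s : List Int × Int × Int × Int) (v : Int) : List Int × Int × Int × Int :=
  if v ≠ s.2.1 then (s.1 ++ [s.2.2.2], v, s.2.2.2, s.2.2.2 + 1)
  else (s.1 ++ [s.2.2.1], s.2.1, s.2.2.1, s.2.2.2 + 1)

def dither_point_first_list (points : List Int) : List Int :=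
  (points.foldl pvDpflStep ([], -1, -1, 0)).1

def dither_point_last_list (points : List Int) : List Int :=
  ((dither_point_first_list points.reverse).reverse).map
    (fun x => (points.length : Int) - (x + 1))

-- ===== PORT B =====
-- length of the run of value v at the front of the list (Source B's inner while loop)
def pvRunLen (v : Int) : List Int → Nat
  | [] => 0
  | x :: xs => if x = v then pvRunLen v xs + 1 else 0

-- Source B's outer while loop: rest, idx; k = pvRunLen v rest + 1
def pvGoB (idx : Int) : List Int → List Int
  | [] => []
  | v :: rest =>
    let r := pvRunLen v rest
    List.replicate (r + 1) (idx + r) ++ pvGoB (idx + (r + 1)) (rest.drop r)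
termination_by l => l.length
decreasing_by simp

def dither_point_last_list_alt (points : List Int) : List Int := pvGoB 0 points

-- ===== PRECONDITION & SPEC =====
-- On lists whose last element is -1, A's -1 sentinel makes it return the out-of-range
-- index len(points) for every position of the trailing run of -1s, while B returns the
-- correct last index len(points)-1, which is the intended value (the inputs are documented
-- as 0-255 ints, and an index equal to the length is never a valid answer).
def D_dither_point_last_list (points : List Int) : Prop :=
  points ≠ [] ∧ points.getLast? = some (-1)
instance (points : List Int) : Decidable (D_dither_point_last_list points) := by
  unfold D_dither_point_last_list; infer_instance

def Spec_dither_point_last_list (points : List Int) (out : List Int) : Prop :=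
  ¬ D_dither_point_last_list points → out = dither_point_last_list_alt points
instance (points : List Int) (out : List Int) : Decidable (Spec_dither_point_last_list points out) := by
  unfold Spec_dither_point_last_list; infer_instance

def pvDiffWitness_dither_point_last_list : List Int := [-1]
def pvDiffWitnessOut_dither_point_last_list : (List Int) × (List Int) := ([1], [0])

-- ===== CLAIM (what is proved, stated in full; the proofs are below) =====
def Claim_unchanged_dither_point_last_list : Prop :=
  ∀ (points : List Int), Dom_dither_point_last_list points →
    Spec_dither_point_last_list points (dither_point_last_list points)

def Claim_changed_dither_point_last_list : Prop :=
  Dom_dither_point_last_list (pvDiffWitness_dither_point_last_list) ∧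
  D_dither_point_last_list (pvDiffWitness_dither_point_last_list) ∧
  dither_point_last_list (pvDiffWitness_dither_point_last_list) = pvDiffWitnessOut_dither_point_last_list.1 ∧
  dither_point_last_list_alt (pvDiffWitness_dither_point_last_list) = pvDiffWitnessOut_dither_point_last_list.2 ∧
  pvDiffWitnessOut_dither_point_last_list.1 ≠ pvDiffWitnessOut_dither_point_last_list.2

def Claim_exact_dither_point_last_list : Prop :=
  ∀ (points : List Int), Dom_dither_point_last_list points →
    D_dither_point_last_list points →
    dither_point_last_list points ≠ dither_point_last_list_alt points

-- ===== LEMMAS AND PROOFS =====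

-- pure version of A's accumulator loop
def pvF (lv li idx : Int) : List Int → List Int
  | [] => []
  | v :: rest => if v ≠ lv then idx :: pvF v idx (idx + 1) rest
                 else li :: pvF lv li (idx + 1) rest

-- pvF once the sentinel no longer matters
def pvG (idx : Int) : List Int → List Int
  | [] => []
  | v :: rest => idx :: pvF v idx (idx + 1) rest

theorem pvFoldl_F (xs : List Int) : ∀ (lst : List Int) (lv li idx : Int),
    (xs.foldl pvDpflStep (lst, lv, li, idx)).1 = lst ++ pvF lv li idx xs := by
  induction xs with
  | nil => intro lst lv li idx; simp [pvF]
  | cons v rest ih =>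
    intro lst lv li idx
    by_cases h : v = lv <;> simp [pvDpflStep, h, pvF, ih]

theorem pvF_shift (q : List Int) : ∀ (lv li idx c : Int),
    pvF lv (li + c) (idx + c) q = (pvF lv li idx q).map (· + c) := by
  induction q with
  | nil => intro lv li idx c; simp [pvF]
  | cons v rest ih =>
    intro lv li idx c
    by_cases h : v = lv
    · simp only [pvF, h, ne_eq, not_true_eq_false, if_false, List.map_cons, List.cons.injEq,
        true_and]
      rw [show idx + c + 1 = (idx + 1) + c by ring]
      exact ih lv li (idx + 1) c
    · simp only [pvF, h, ne_eq, not_false_eq_true, if_true, List.map_cons, List.cons.injEq,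
        true_and]
      rw [show idx + c + 1 = (idx + 1) + c by ring]
      exact ih v idx (idx + 1) c

theorem pvG_shift (q : List Int) (idx : Int) :
    pvG idx q = (pvG 0 q).map (· + idx) := by
  cases q with
  | nil => simp [pvG]
  | cons v rest =>
    have h := pvF_shift rest v 0 1 idx
    simp only [pvG, List.map_cons, zero_add, List.cons.injEq, true_and]
    rw [show idx + 1 = 1 + idx by ring]
    simpa using h

theorem pvRunLen_head (q : List Int) (v : Int) (h : q.head? ≠ some v) :
    pvRunLen v q = 0 := by
  cases q with
  | nil => simp [pvRunLen]
  | cons w rest =>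
    simp only [List.head?_cons, ne_eq, Option.some.injEq] at h
    simp [pvRunLen, h]

theorem pvRunLen_replicate_append (v : Int) (r : Nat) (q : List Int) :
    pvRunLen v (List.replicate r v ++ q) = r + pvRunLen v q := by
  induction r with
  | zero => simp
  | succ n ih => simp [List.replicate_succ, pvRunLen, ih]; omega

theorem pvRunLen_take (q : List Int) (v : Int) :
    q.take (pvRunLen v q) = List.replicate (pvRunLen v q) v := by
  induction q with
  | nil => simp [pvRunLen]
  | cons w rest ih =>
    by_cases h : w = v
    · simp [pvRunLen, h, List.replicate_succ, ih]
    · simp [pvRunLen, h]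

theorem pvRunLen_drop_head (q : List Int) (v : Int) :
    (q.drop (pvRunLen v q)).head? ≠ some v := by
  induction q with
  | nil => simp [pvRunLen]
  | cons w rest ih =>
    by_cases h : w = v
    · simpa [pvRunLen, h] using ih
    · simp [pvRunLen, h]

theorem pvRunLen_le (q : List Int) (v : Int) : pvRunLen v q ≤ q.length := by
  induction q with
  | nil => simp [pvRunLen]
  | cons w rest ih =>
    by_cases h : w = v <;> simp [pvRunLen, h] <;> omega

theorem pvRunLen_decomp (q : List Int) (v : Int) :
    q = List.replicate (pvRunLen v q) v ++ q.drop (pvRunLen v q) := by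
  conv_lhs => rw [← List.take_append_drop (pvRunLen v q) q]
  rw [pvRunLen_take]

theorem pvF_run (q : List Int) : ∀ (li idx v : Int),
    pvF v li idx q =
      List.replicate (pvRunLen v q) li ++ pvF v li (idx + pvRunLen v q) (q.drop (pvRunLen v q)) := by
  induction q with
  | nil => intro li idx v; simp [pvRunLen]
  | cons w rest ih =>
    intro li idx v
    by_cases h : w = v
    · subst h
      have hrec := ih li (idx + 1) w
      rw [show idx + 1 + (pvRunLen w rest : Int) = idx + ((pvRunLen w rest : Int) + 1) by ring] at hrec
      simp [pvF, pvRunLen, List.replicate_succ, hrec]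
    · simp [pvRunLen, h, pvF]

theorem pvF_to_G (q : List Int) (v li idx : Int) (h : q.head? ≠ some v) :
    pvF v li idx q = pvG idx q := by
  cases q with
  | nil => simp [pvF, pvG]
  | cons w rest =>
    simp only [List.head?_cons, ne_eq, Option.some.injEq] at h
    simp [pvF, pvG, h]

theorem pvG_cons (v : Int) (rest : List Int) (idx : Int) :
    pvG idx (v :: rest) =
      List.replicate (pvRunLen v rest + 1) idx ++
        pvG (idx + (pvRunLen v rest + 1)) (rest.drop (pvRunLen v rest)) := by
  have h2 := pvF_to_G (rest.drop (pvRunLen v rest)) v idx (idx + 1 + (pvRunLen v rest : Int))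
      (pvRunLen_drop_head rest v)
  have harith : idx + 1 + (pvRunLen v rest : Int) = idx + ((pvRunLen v rest : Int) + 1) := by
    ring
  rw [harith] at h2
  simp only [pvG, pvF_run rest idx (idx + 1) v, harith, h2, List.replicate_succ,
    List.cons_append]

theorem pvGoB_nil (idx : Int) : pvGoB idx [] = [] := by
  rw [pvGoB]

theorem pvGoB_cons (idx v : Int) (rest : List Int) :
    pvGoB idx (v :: rest) =
      List.replicate (pvRunLen v rest + 1) (idx + pvRunLen v rest) ++
        pvGoB (idx + (pvRunLen v rest + 1)) (rest.drop (pvRunLen v rest)) := by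
  rw [pvGoB]

theorem pvGetLast_cons_of_ne_nil {α : Type} (a : α) (l : List α) (h : l ≠ []) :
    (a :: l).getLast? = l.getLast? := by
  cases l with
  | nil => exact absurd rfl h
  | cons b m => exact List.getLast?_cons_cons

theorem pvRunLen_self_replicate (v : Int) (r : Nat) :
    pvRunLen v (List.replicate r v) = r := by
  simpa using pvRunLen_replicate_append v r []

theorem pvGoB_replicate (idx : Int) (v : Int) (r : Nat) :
    pvGoB idx (List.replicate (r + 1) v) = List.replicate (r + 1) (idx + r) := by
  rw [List.replicate_succ, pvGoB_cons]
  simp [pvRunLen_self_replicate, pvGoB_nil]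

theorem pvGoB_ne_nil (idx : Int) (q : List Int) (h : q ≠ []) : pvGoB idx q ≠ [] := by
  cases q with
  | nil => exact absurd rfl h
  | cons v rest => rw [pvGoB_cons]; simp

theorem pvGetLast_replicate_succ {α : Type} (a : α) (n : Nat) :
    (List.replicate (n + 1) a).getLast? = some a := by
  induction n with
  | zero => simp
  | succ m ih =>
    rw [List.replicate_succ, List.getLast?_cons]
    simp only [List.replicate_succ] at ih ⊢
    simp [ih]

theorem pvGoB_append_run (n : Nat) : ∀ (xs : List Int), xs.length ≤ n →
    ∀ (v idx : Int) (k : Nat), xs.getLast? ≠ some v →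
    pvGoB idx (xs ++ List.replicate (k + 1) v) =
      pvGoB idx xs ++ List.replicate (k + 1) (idx + xs.length + k) := by
  induction n with
  | zero =>
    intro xs hlen v idx k _
    have hx : xs = [] := List.eq_nil_of_length_eq_zero (Nat.le_zero.mp hlen)
    subst hx
    simp [pvGoB_nil, pvGoB_replicate]
  | succ n ih =>
    intro xs hlen v idx k hlast
    cases xs with
    | nil => simp [pvGoB_nil, pvGoB_replicate]
    | cons w t =>
      have hdec := pvRunLen_decomp t w
      set r := pvRunLen w t with hr
      by_cases hnil : t.drop r = []
      · -- the whole of w::t is one run of w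
        have ht : t = List.replicate r w := by
          conv_lhs => rw [hdec]; simp [hnil]
        have hxs : w :: t = List.replicate (r + 1) w := by
          rw [ht, List.replicate_succ]
        have hwv : w ≠ v := by
          intro he
          apply hlast
          rw [hxs, pvGetLast_replicate_succ, he]
        -- both sides
        have hrl : pvRunLen w (t ++ List.replicate (k + 1) v) = r := by
          rw [ht, pvRunLen_replicate_append]
          have : pvRunLen w (List.replicate (k + 1) v) = 0 := by
            apply pvRunLen_head
            rw [List.replicate_succ]
            simp [Ne.symm hwv]
          omega
        rw [List.cons_append, pvGoB_cons]
        simp only [hrl]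
        rw [ht]
        rw [List.drop_append_of_le_length (by simp)]
        simp only [List.drop_replicate, Nat.sub_self, List.replicate_zero, List.nil_append]
        rw [pvGoB_replicate]
        rw [show w :: List.replicate r w = List.replicate (r + 1) w from
          (List.replicate_succ (a := w) (n := r)).symm]
        rw [pvGoB_replicate]
        simp only [List.length_replicate]
        congr 2
      · -- run ends inside t
        have ht' : (t.drop r).head? ≠ some w := pvRunLen_drop_head t w
        have htne : t ≠ [] := by
          intro h0; rw [h0] at hnil; simp at hnil
        have hrl : pvRunLen w (t ++ List.replicate (k + 1) v) = r := by
          conv_lhs => rw [hdec]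
          rw [List.append_assoc, pvRunLen_replicate_append]
          have : pvRunLen w (t.drop r ++ List.replicate (k + 1) v) = 0 := by
            apply pvRunLen_head
            cases hdq : t.drop r with
            | nil => exact absurd hdq hnil
            | cons a b =>
              rw [hdq] at ht'
              simpa using ht'
          omega
        have hdrop : (t ++ List.replicate (k + 1) v).drop r = t.drop r ++ List.replicate (k + 1) v :=
          List.drop_append_of_le_length (pvRunLen_le t w)
        have hlast' : (t.drop r).getLast? ≠ some v := by
          have h1 : (w :: t).getLast? = t.getLast? := pvGetLast_cons_of_ne_nil w t htne
          have h2 : t.getLast? = (t.drop r).getLast? := by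
            conv_lhs => rw [hdec]
            exact List.getLast?_append_of_ne_nil _ hnil
          rw [h1, h2] at hlast
          exact hlast
        have hlen' : (t.drop r).length ≤ n := by
          have := List.length_drop (l := t) (i := r)
          simp only [List.length_cons] at hlen
          omega
        have hIH := ih (t.drop r) hlen' v (idx + (r + 1)) k hlast'
        rw [List.cons_append, pvGoB_cons]
        simp only [hrl, hdrop, hIH]
        rw [pvGoB_cons]
        simp only [← hr, List.append_assoc]
        congr 2
        have hlt : t.length = r + (t.drop r).length := by
          have := pvRunLen_le t w
          have := List.length_drop (l := t) (i := r)
          omega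
        simp only [List.length_cons, hlt]
        congr 1
        push_cast
        ring

theorem pvMain (n : Nat) : ∀ (q : List Int), q.length ≤ n →
    pvGoB 0 q.reverse =
      ((pvG 0 q).map (fun x => (q.length : Int) - 1 - x)).reverse := by
  induction n with
  | zero =>
    intro q hlen
    have hq : q = [] := List.eq_nil_of_length_eq_zero (Nat.le_zero.mp hlen)
    subst hq
    simp [pvGoB_nil, pvG]
  | succ n ih =>
    intro q hlen
    cases q with
    | nil => simp [pvGoB_nil, pvG]
    | cons v rest =>
      have hdec := pvRunLen_decomp rest v
      set r := pvRunLen v rest with hr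
      set t' := rest.drop r with ht'
      -- reverse decomposition
      have hrev : (v :: rest).reverse = t'.reverse ++ List.replicate (r + 1) v := by
        conv_lhs => rw [hdec]
        rw [List.reverse_cons, List.reverse_append, List.reverse_replicate, List.append_assoc,
          List.replicate_succ']
      have hlastrev : t'.reverse.getLast? ≠ some v := by
        rw [List.getLast?_reverse]
        exact pvRunLen_drop_head rest v
      have hlen' : t'.length ≤ n := by
        have := List.length_drop (l := rest) (i := r)
        simp only [List.length_cons] at hlen
        simp only [ht']
        omega
      have happ := pvGoB_append_run t'.reverse.length t'.reverse le_rfl v 0 r hlastrev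
      have hIH := ih t' hlen'
      -- lengths
      have hrle := pvRunLen_le rest v
      have hlt : rest.length = r + t'.length := by
        have := List.length_drop (l := rest) (i := r)
        simp only [ht']
        omega
      rw [hrev, happ, hIH]
      -- right-hand side
      rw [pvG_cons, ← hr, ← ht', pvG_shift t' (0 + ((r : Int) + 1))]
      rw [List.map_append, List.map_map, List.reverse_append, List.map_replicate,
        List.reverse_replicate]
      congr 1
      · -- the mapped recursive part
        congr 1
        apply List.map_congr_left
        intro x _
        simp only [Function.comp_apply, List.length_cons, hlt]
        push_cast
        ring
      · -- the replicate part
        simp only [List.length_reverse]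
        congr 1
        simp only [List.length_cons, hlt]
        push_cast
        ring

theorem pvA_eq_F (points : List Int) :
    dither_point_last_list points =
      ((pvF (-1) (-1) 0 points.reverse).map
        (fun x => (points.length : Int) - (x + 1))).reverse := by
  unfold dither_point_last_list dither_point_first_list
  rw [pvFoldl_F]
  simp [List.map_reverse]

theorem pvGoB_getLast (n : Nat) : ∀ (q : List Int), q.length ≤ n → q ≠ [] →
    ∀ (idx : Int), (pvGoB idx q).getLast? = some (idx + q.length - 1) := by
  induction n with
  | zero =>
    intro q hlen hq idx
    exact absurd (List.eq_nil_of_length_eq_zero (Nat.le_zero.mp hlen)) hq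
  | succ n ih =>
    intro q hlen hq idx
    cases q with
    | nil => exact absurd rfl hq
    | cons v rest =>
      rw [pvGoB_cons]
      set r := pvRunLen v rest with hr
      by_cases hnil : rest.drop r = []
      · simp only [hnil, pvGoB_nil, List.append_nil]
        rw [pvGetLast_replicate_succ]
        have hrle := pvRunLen_le rest v
        have : rest.length = r := by
          have := List.length_drop (l := rest) (i := r)
          simp only [hnil, List.length_nil] at this
          omega
        simp only [List.length_cons, this]
        congr 1
        push_cast
        ring
      · have hlen' : (rest.drop r).length ≤ n := by
          have := List.length_drop (l := rest) (i := r)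
          simp only [List.length_cons] at hlen
          omega
        rw [List.getLast?_append_of_ne_nil _ (pvGoB_ne_nil _ _ hnil)]
        rw [ih (rest.drop r) hlen' hnil (idx + ((r : Int) + 1))]
        have hrle := pvRunLen_le rest v
        have := List.length_drop (l := rest) (i := r)
        congr 1
        simp only [List.length_cons, this]
        push_cast
        omega

-- ===== VERDICT (by name: the statement is the Claim_ definition above) =====
theorem dither_point_last_list_spec : Claim_unchanged_dither_point_last_list := by
  intro points _ hD
  show dither_point_last_list points = dither_point_last_list_alt points
  unfold dither_point_last_list_alt
  rw [pvA_eq_F]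
  have hhead : points.reverse.head? ≠ some (-1) := by
    rw [List.head?_reverse]
    intro hc
    apply hD
    constructor
    · intro h0; rw [h0] at hc; simp at hc
    · exact hc
  rw [pvF_to_G points.reverse (-1) (-1) 0 hhead]
  have := pvMain points.reverse.length points.reverse le_rfl
  rw [List.reverse_reverse] at this
  rw [← List.map_reverse] at this
  rw [this, List.map_reverse]
  congr 1
  apply List.map_congr_left
  intro x _
  simp only [List.length_reverse]
  ring

theorem dither_point_last_list_changed : Claim_changed_dither_point_last_list := by
  unfold Claim_changed_dither_point_last_list
  refine ⟨by decide, by decide, by decide, ?_, by decide⟩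
  show dither_point_last_list_alt pvDiffWitness_dither_point_last_list = _
  simp [dither_point_last_list_alt, pvDiffWitness_dither_point_last_list,
    pvDiffWitnessOut_dither_point_last_list, pvGoB_cons, pvGoB_nil, pvRunLen]

theorem dither_point_last_list_tight : Claim_exact_dither_point_last_list := by
  intro points _ hD heq
  obtain ⟨hne, hlast⟩ := hD
  -- B's last element is points.length - 1
  have hBlast : (dither_point_last_list_alt points).getLast? =
      some ((points.length : Int) - 1) := by
    unfold dither_point_last_list_alt
    have := pvGoB_getLast points.length points le_rfl hne 0
    rw [this]
    congr 1
    ring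
  -- A's last element is points.length
  have hq : points.reverse.head? = some (-1) := by
    rw [List.head?_reverse]; exact hlast
  have hAlast : (dither_point_last_list points).getLast? = some (points.length : Int) := by
    rw [pvA_eq_F]
    rw [List.getLast?_reverse]
    cases hqq : points.reverse with
    | nil =>
      rw [hqq] at hq; simp at hq
    | cons w q' =>
      rw [hqq] at hq
      simp only [List.head?_cons, Option.some.injEq] at hq
      subst hq
      simp only [pvF, ne_eq, not_true_eq_false, if_false, List.map_cons, List.head?_cons,
        Option.some.injEq]
      ring
  rw [heq, hBlast] at hAlast
  simp only [Option.some.injEq] at hAlast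
  omega
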